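-- pv_equiv track=rewrite | github.com/coke05288/Algorithm-Python | BruteForce/Baekjoon-16968-차량번호판1.py | comb_solution
-- ===== SOURCE A (Python) =====
-- def comb_solution(_s):
--     answer = 1
--
--     for i in range(0, len(_s)):
--         cnt = 26 if _s[i] == 'c' else 10
--
--         if i > 0 and _s[i] == _s[i - 1]:
--             cnt -= 1
--
--         answer = answer * cnt
--
--     return answer
-- ===== SOURCE B (Python) =====
-- def comb_solution(_s):
--     # Run-based: each maximal run of identical chars contributes b * (b-1)**(L-1).
--     answer = 1
--     i, n = 0, len(_s)
--     while i < n: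
--         j = i + 1
--         while j < n and _s[j] == _s[i]:
--             j += 1
--         b = 26 if _s[i] == 'c' else 10
--         answer *= b * (b - 1) ** (j - i - 1)
--         i = j
--     return answer
-- ===== Notes on version B (the rewrite author's own statement) =====
-- stated objective: alternative
-- what changed: Replaces the per-index loop with previous-character comparison by splitting the string into maximal runs of identical characters and multiplying each run's closed-form contribution b*(b-1)**(L-1).
import Mathlib
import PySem

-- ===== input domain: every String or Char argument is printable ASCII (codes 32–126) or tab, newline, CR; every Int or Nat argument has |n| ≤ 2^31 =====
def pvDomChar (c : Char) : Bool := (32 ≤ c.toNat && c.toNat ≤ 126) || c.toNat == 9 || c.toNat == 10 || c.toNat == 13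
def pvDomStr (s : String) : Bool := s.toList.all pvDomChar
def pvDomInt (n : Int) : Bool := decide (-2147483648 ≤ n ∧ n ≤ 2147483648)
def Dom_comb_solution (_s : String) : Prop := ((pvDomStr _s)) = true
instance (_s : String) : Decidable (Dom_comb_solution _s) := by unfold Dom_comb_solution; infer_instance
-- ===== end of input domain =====

-- B replaces A's per-index previous-character comparison by maximal-run detection
-- with a closed-form per-run contribution b * (b-1)^(L-1); same O(n) cost (objective: alternative).

-- ===== PORT A =====
def comb_solution (_s : String) : Int :=
  (PySem.List.pyRange 0 (PySem.Str.len _s) 1).foldl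
    (fun answer i =>
      let cnt : Int := if PySem.List.pyGetD _s.toList i ' ' = 'c' then 26 else 10
      let cnt : Int :=
        if i > 0 ∧ PySem.List.pyGetD _s.toList i ' ' = PySem.List.pyGetD _s.toList (i - 1) ' '
        then cnt - 1 else cnt
      answer * cnt) 1

-- ===== PORT B =====
def pvBase (c : Char) : Int := if c = 'c' then 26 else 10

-- length of the maximal run of `c` at the front of the list, and the rest
def pvRunLen (c : Char) : List Char → Nat × List Char
  | [] => (0, [])
  | d :: t => if d = c then ((pvRunLen c t).1 + 1, (pvRunLen c t).2) else (0, d :: t)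

theorem pvRunLen_snd_length_le (c : Char) : ∀ t : List Char, (pvRunLen c t).2.length ≤ t.length := by
  intro t
  induction t with
  | nil => simp [pvRunLen]
  | cons d t ih =>
    by_cases h : d = c
    · simp [pvRunLen, h]; omega
    · simp [pvRunLen, h]

def pvAltGo : List Char → Int
  | [] => 1
  | c :: t =>
    pvBase c * (pvBase c - 1) ^ (pvRunLen c t).1 * pvAltGo (pvRunLen c t).2
termination_by l => l.length
decreasing_by
  have := pvRunLen_snd_length_le c t
  simp; omega

def comb_solution_alt (_s : String) : Int := pvAltGo _s.toList

-- ===== PRECONDITION & SPEC =====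
def Spec_comb_solution (_s : String) (out : Int) : Prop := out = comb_solution_alt _s
instance (_s : String) (out : Int) : Decidable (Spec_comb_solution _s out) := by unfold Spec_comb_solution; infer_instance

-- ===== CLAIM (what is proved, stated in full; the proofs are below) =====
def Claim_equal_comb_solution : Prop := ∀ (_s : String), Dom_comb_solution _s → Spec_comb_solution _s (comb_solution _s)

-- ===== LEMMAS AND PROOFS =====

-- per-character factor given the previous character
def pvCnt (p : Option Char) (c : Char) : Int := if some c = p then pvBase c - 1 else pvBase c

-- reference recursion: product of per-character factors, threading the previous character
def pvSpec : Option Char → List Char → Int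
  | _, [] => 1
  | p, c :: t => pvCnt p c * pvSpec (some c) t

theorem pvSpec_run (c : Char) : ∀ t : List Char,
    pvSpec (some c) t = (pvBase c - 1) ^ (pvRunLen c t).1 * pvSpec none (pvRunLen c t).2 := by
  intro t
  induction t with
  | nil => simp [pvRunLen, pvSpec]
  | cons d t ih =>
    by_cases h : d = c
    · subst h
      simp [pvRunLen, pvSpec, pvCnt, ih, pow_succ]
      ring
    · simp [pvRunLen, h, pvSpec, pvCnt]

theorem pvAltGo_eq_spec (cs : List Char) : pvAltGo cs = pvSpec none cs := by
  induction cs using pvAltGo.induct with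
  | case1 => simp [pvAltGo, pvSpec]
  | case2 c t ih =>
    rw [pvAltGo, pvSpec, pvSpec_run c t, ih]
    simp [pvCnt]
    ring

-- bridge: A's index fold from position k equals pvSpec with the character at k-1 as previous
theorem pvFoldA (cs : List Char) (n : Nat) : ∀ (k : Nat) (a : Int), k ≤ cs.length → n = cs.length - k →
    (PySem.List.pyRange (k : Int) (cs.length : Int) 1).foldl
      (fun answer i =>
        let cnt : Int := if PySem.List.pyGetD cs i ' ' = 'c' then 26 else 10
        let cnt : Int :=
          if i > 0 ∧ PySem.List.pyGetD cs i ' ' = PySem.List.pyGetD cs (i - 1) ' '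
          then cnt - 1 else cnt
        answer * cnt) a
    = a * pvSpec (if k = 0 then none else some (cs.getD (k - 1) ' ')) (cs.drop k) := by
  induction n with
  | zero =>
    intro k a hk hn
    have hke : k = cs.length := by omega
    subst hke
    rw [PySem.List.pyRange_one_eq_nil (le_refl _)]
    simp [pvSpec]
  | succ n ih =>
    intro k a hk hn
    have hlt : k < cs.length := by omega
    have hlt' : (k : Int) < (cs.length : Int) := by exact_mod_cast hlt
    rw [PySem.List.pyRange_one_cons hlt']
    simp only [List.foldl_cons]
    have hcast : (k : Int) + 1 = ((k + 1 : Nat) : Int) := by push_cast; ring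
    rw [hcast, ih (k + 1) _ (by omega) (by omega)]
    have hdrop : cs.drop k = cs[k] :: cs.drop (k + 1) := (List.getElem_cons_drop hlt).symm
    have hgetk : PySem.List.pyGetD cs (k : Int) ' ' = cs[k] := by
      rw [PySem.List.pyGetD_natCast]
      exact List.getD_eq_getElem cs ' ' hlt
    have hgd : cs.getD k ' ' = cs[k] := List.getD_eq_getElem cs ' ' hlt
    rw [hdrop]
    simp only [pvSpec, Nat.add_sub_cancel, if_neg (Nat.succ_ne_zero k), hgd, hgetk]
    rcases Nat.eq_zero_or_pos k with hk0 | hk0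
    · subst hk0
      simp [pvCnt, pvBase]
      split_ifs <;> ring
    · have hkpos : (0 : Int) < (k : Int) := by exact_mod_cast hk0
      have hcast1 : (k : Int) - 1 = ((k - 1 : Nat) : Int) := by push_cast [hk0]; ring
      have hgetk1 : PySem.List.pyGetD cs ((k : Int) - 1) ' ' = cs.getD (k - 1) ' ' := by
        rw [hcast1, PySem.List.pyGetD_natCast]
      rw [hgetk1, if_neg (Nat.pos_iff_ne_zero.mp hk0)]
      by_cases hc : cs[k] = cs.getD (k - 1) ' '
      · rw [if_pos ⟨hkpos, hc⟩]
        simp only [pvCnt, pvBase, ← hc, reduceIte]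
        split_ifs <;> ring
      · rw [if_neg (fun h => hc h.2)]
        have hne : ¬ (some cs[k] = some (cs.getD (k - 1) ' ')) := by simpa using hc
        simp only [pvCnt, pvBase]
        rw [if_neg hne]
        split_ifs <;> ring

-- ===== VERDICT (by name: the statement is the Claim_ definition above) =====
theorem comb_solution_spec : Claim_equal_comb_solution := by
  intro s _
  unfold Spec_comb_solution comb_solution comb_solution_alt
  rw [PySem.Str.len_eq]
  have h := pvFoldA s.toList s.toList.length 0 1 (Nat.zero_le _) (by omega)
  simp only [Nat.cast_zero, List.drop_zero, reduceIte] at h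
  rw [h, pvAltGo_eq_spec]
  ring
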